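-- pv_equiv track=rewrite | github.com/universe-engine-ai/serenissima | backend/arsenale/criticality_fixes.py | _detect_message_cascades
-- ===== SOURCE A (Python) =====
-- from typing import List, Dict, Tuple, Optional, Any
-- from collections import defaultdict
--
-- def _detect_message_cascades(messages: List[Dict]) -> List[int]:
--     """
--     Simple cascade detection based on reply chains
--     Returns list of cascade sizes
--     """
--     # Build reply graph
--     reply_graph = defaultdict(list)
--     root_messages = []
--
--     for msg in messages:
--         if msg.get('replyToId'):
--             reply_graph[msg['replyToId']].append(msg['id'])
--         else:
--             root_messages.append(msg['id'])
--
--     # Calculate cascade sizes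
--     cascade_sizes = []
--
--     def get_cascade_size(msg_id: str) -> int:
--         size = 1
--         for reply_id in reply_graph.get(msg_id, []):
--             size += get_cascade_size(reply_id)
--         return size
--
--     for root_id in root_messages:
--         size = get_cascade_size(root_id)
--         if size > 1:  # Only count actual cascades
--             cascade_sizes.append(size)
--
--     return cascade_sizes
-- ===== SOURCE B (Python) =====
-- def _detect_message_cascades(messages):
--     """
--     Simple cascade detection based on reply chains
--     Returns list of cascade sizes
--     """
--     # Build reply graph (same bookkeeping as the original)
--     from collections import defaultdict
--     reply_graph = defaultdict(list)
--     root_messages = []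
--
--     for msg in messages:
--         if msg.get('replyToId'):
--             reply_graph[msg['replyToId']].append(msg['id'])
--         else:
--             root_messages.append(msg['id'])
--
--     # Iterative stack-based DFS instead of recursion: count every node
--     # popped while exploring a root's reply tree.
--     cascade_sizes = []
--     for root_id in root_messages:
--         stack = [root_id]
--         size = 0
--         while stack:
--             node = stack.pop()
--             size += 1
--             stack.extend(reply_graph.get(node, []))
--         if size > 1:  # Only count actual cascades
--             cascade_sizes.append(size)
--
--     return cascade_sizes
-- ===== Notes on version B (the rewrite author's own statement) =====
-- stated objective: alternative
-- what changed: The recursive get_cascade_size helper (recursion per reply) is replaced by an explicit stack-based iterative DFS that counts popped nodes, removing recursion entirely; Pre_ excludes messages without an 'id' key (A raises KeyError) and inputs with a reply cycle reachable from a root (A's recursion does not terminate and raises RecursionError), stated as: no reply-walk of length n+1 starting at a root.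
import Mathlib
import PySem

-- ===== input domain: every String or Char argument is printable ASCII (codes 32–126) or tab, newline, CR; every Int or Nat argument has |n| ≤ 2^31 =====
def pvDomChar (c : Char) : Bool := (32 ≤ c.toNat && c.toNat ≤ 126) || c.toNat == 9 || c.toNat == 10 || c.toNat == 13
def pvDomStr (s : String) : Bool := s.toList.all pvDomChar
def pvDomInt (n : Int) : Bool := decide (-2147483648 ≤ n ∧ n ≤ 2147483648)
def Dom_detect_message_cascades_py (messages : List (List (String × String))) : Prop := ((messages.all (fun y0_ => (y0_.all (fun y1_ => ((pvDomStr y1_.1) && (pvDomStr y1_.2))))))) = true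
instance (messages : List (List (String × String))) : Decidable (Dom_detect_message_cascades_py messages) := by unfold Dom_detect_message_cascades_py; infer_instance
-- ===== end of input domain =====

-- B replaces A's recursive per-reply subtree-size helper with an explicit stack-based
-- iterative DFS counting popped nodes; same return value wherever A returns.


-- shared dict-primitive helpers (Python dict lookup on an association list: first match)
def pvGet (m : List (String × String)) (k : String) : Option String :=
  (m.find? (fun p => p.1 == k)).map (·.2)

-- truthiness of msg.get(k): present and non-empty
def pvTruthy (o : Option String) : Bool :=
  match o with
  | some s => s ≠ ""
  | none => false

def pvIdOf (m : List (String × String)) : String := (pvGet m "id").getD ""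
def pvReplyOf (m : List (String × String)) : String := (pvGet m "replyToId").getD ""

-- the first loop of A and of B (identical in both Pythons): build
-- reply_graph (defaultdict append) and root_messages
def pvBuildStep (st : PySem.Dict String (List String) × List String)
    (msg : List (String × String)) : PySem.Dict String (List String) × List String :=
  if pvTruthy (pvGet msg "replyToId") then
    (st.1.modify (pvReplyOf msg) [] (fun l => l ++ [pvIdOf msg]), st.2)
  else
    (st.1, st.2 ++ [pvIdOf msg])

def pvBuild (messages : List (List (String × String))) :
    PySem.Dict String (List String) × List String :=
  messages.foldl pvBuildStep (PySem.Dict.empty, [])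

-- ===== PORT A =====
-- A's recursive get_cascade_size; the Nat argument is a totality fuel only:
-- under Pre_ the recursion depth is at most messages.length, so fuel
-- messages.length + 1 is never exhausted there
def pvCascadeSize (g : PySem.Dict String (List String)) : Nat → String → Int
  | 0, _ => 1
  | f + 1, x => (g.getD x []).foldl (fun s c => s + pvCascadeSize g f c) 1

def detect_message_cascades_py (messages : List (List (String × String))) : List Int :=
  let st := pvBuild messages
  st.2.foldl (fun acc r =>
    let s := pvCascadeSize st.1 (messages.length + 1) r
    if s > 1 then acc ++ [s] else acc) []

-- ===== PORT B =====
-- B's while loop: pop the last element, count it, extend with its replies.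
-- The Nat argument is a totality fuel only: under Pre_ the number of pops is
-- at most (messages.length + 1) ^ (messages.length + 1), so it is never exhausted there
def pvDfsLoop (g : PySem.Dict String (List String)) : Nat → List String → Int → Int
  | 0, _, size => size
  | _ + 1, [], size => size
  | f + 1, s :: ss, size =>
      pvDfsLoop g f ((s :: ss).dropLast ++ g.getD ((s :: ss).getLastD "") []) (size + 1)

def detect_message_cascades_py_alt (messages : List (List (String × String))) : List Int :=
  let st := pvBuild messages
  st.2.foldl (fun acc root_id =>
    let size := pvDfsLoop st.1 ((messages.length + 1) ^ (messages.length + 1)) [root_id] 0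
    if size > 1 then acc ++ [size] else acc) []

-- ===== PRECONDITION & SPEC =====
-- pvWalkSet messages k = the ids reachable from a root by a reply-walk of exactly k
-- steps (W0 = ids of the root messages; W(k+1) = ids of messages whose non-empty
-- replyToId lies in Wk)
def pvWalkSet (messages : List (List (String × String))) : Nat → List String
  | 0 => (messages.filter (fun m => !pvTruthy (pvGet m "replyToId"))).map pvIdOf
  | k + 1 => (messages.filter (fun m =>
      pvTruthy (pvGet m "replyToId") && (pvWalkSet messages k).contains (pvReplyOf m))).map pvIdOf

-- Pre_ excludes (a) messages without an 'id' key, on which A raises KeyError, and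
-- (b) inputs with a reply-walk of length n+1 from a root — by pigeonhole exactly the
-- inputs with a reply cycle reachable from a root, on which A's recursion does not
-- terminate (RecursionError)
def Pre_detect_message_cascades_py (messages : List (List (String × String))) : Prop :=
  (∀ m ∈ messages, (pvGet m "id").isSome = true) ∧
  pvWalkSet messages (messages.length + 1) = []
instance (messages : List (List (String × String))) : Decidable (Pre_detect_message_cascades_py messages) := by unfold Pre_detect_message_cascades_py; infer_instance

def pvWitness_detect_message_cascades_py : (List (List (String × String))) :=
  ([[("id", "a")], [("id", "b"), ("replyToId", "a")], [("id", "c"), ("replyToId", "a")]])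

def Spec_detect_message_cascades_py (messages : List (List (String × String))) (out : List Int) : Prop := out = detect_message_cascades_py_alt messages
instance (messages : List (List (String × String))) (out : List Int) : Decidable (Spec_detect_message_cascades_py messages out) := by unfold Spec_detect_message_cascades_py; infer_instance

-- ===== CLAIM (what is proved, stated in full; the proofs are below) =====
def Claim_equal_detect_message_cascades_py : Prop := ∀ (messages : List (List (String × String))), Dom_detect_message_cascades_py messages → Pre_detect_message_cascades_py messages → Spec_detect_message_cascades_py messages (detect_message_cascades_py messages)

-- ===== LEMMAS AND PROOFS =====

-- the reply children of id x: ids of the messages whose non-empty replyToId is x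
def pvChildren (l : List (List (String × String))) (x : String) : List String :=
  (l.filter (fun m => pvTruthy (pvGet m "replyToId") && (pvReplyOf m == x))).map pvIdOf

-- a reply chain starting at id x
def pvChain (M : List (List (String × String))) : String → List String → Prop
  | _, [] => True
  | x, c :: t => c ∈ pvChildren M x ∧ pvChain M c t

-- Bnd b x: every reply chain starting at id x has at most b steps
def pvBnd (M : List (List (String × String))) (b : Nat) (x : String) : Prop :=
  ∀ l, pvChain M x l → l.length ≤ b

theorem pv_build_graph_getD (l : List (List (String × String)))
    (d : PySem.Dict String (List String)) (rts : List String) (x : String) :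
    ((l.foldl pvBuildStep (d, rts)).1).getD x [] = d.getD x [] ++ pvChildren l x := by
  induction l generalizing d rts with
  | nil => simp [pvChildren]
  | cons m t ih =>
    simp only [List.foldl_cons]
    by_cases ht : pvTruthy (pvGet m "replyToId") = true
    · have hstep : pvBuildStep (d, rts) m
        = (d.modify (pvReplyOf m) [] (fun l => l ++ [pvIdOf m]), rts) := by
        simp [pvBuildStep, ht]
      rw [hstep, ih]
      by_cases hx : pvReplyOf m = x
      · subst hx
        rw [PySem.Dict.getD_modify_self]
        simp [pvChildren, ht]
      · rw [PySem.Dict.getD_modify_of_ne _ _ _ (fun h => hx h.symm)]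
        simp [pvChildren, ht, hx]
    · have hstep : pvBuildStep (d, rts) m = (d, rts ++ [pvIdOf m]) := by
        simp [pvBuildStep, ht]
      rw [hstep, ih]
      simp [pvChildren, ht]

theorem pv_build_roots (l : List (List (String × String)))
    (d : PySem.Dict String (List String)) (rts : List String) :
    (l.foldl pvBuildStep (d, rts)).2
      = rts ++ (l.filter (fun m => !pvTruthy (pvGet m "replyToId"))).map pvIdOf := by
  induction l generalizing d rts with
  | nil => simp
  | cons m t ih =>
    simp only [List.foldl_cons]
    by_cases ht : pvTruthy (pvGet m "replyToId") = true
    · have hstep : pvBuildStep (d, rts) m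
        = (d.modify (pvReplyOf m) [] (fun l => l ++ [pvIdOf m]), rts) := by
        simp [pvBuildStep, ht]
      rw [hstep, ih]; simp [ht]
    · have hstep : pvBuildStep (d, rts) m = (d, rts ++ [pvIdOf m]) := by
        simp [pvBuildStep, ht]
      rw [hstep, ih]; simp [ht]

theorem pv_children_next (M : List (List (String × String))) (x c : String) (k : Nat)
    (hx : x ∈ pvWalkSet M k) (hc : c ∈ pvChildren M x) :
    c ∈ pvWalkSet M (k + 1) := by
  rcases List.mem_map.mp hc with ⟨m, hm, hcid⟩
  rcases List.mem_filter.mp hm with ⟨hmem, hcond⟩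
  simp only [Bool.and_eq_true] at hcond
  have hrx : pvReplyOf m = x := by simpa using hcond.2
  refine List.mem_map.mpr ⟨m, List.mem_filter.mpr ⟨hmem, ?_⟩, hcid⟩
  simp only [hcond.1, Bool.true_and, List.contains_iff_mem]
  exact hrx ▸ hx

theorem pv_walk_empty_succ (M : List (List (String × String))) (k : Nat)
    (h : pvWalkSet M k = []) : pvWalkSet M (k + 1) = [] := by
  rcases hne : pvWalkSet M (k + 1) with _ | ⟨y, ys⟩
  · rfl
  · exfalso
    have hy : y ∈ pvWalkSet M (k + 1) := by rw [hne]; exact List.mem_cons_self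
    rcases List.mem_map.mp hy with ⟨m, hm, _⟩
    rcases List.mem_filter.mp hm with ⟨_, hcond⟩
    simp only [Bool.and_eq_true] at hcond
    have : pvReplyOf m ∈ pvWalkSet M k := List.contains_iff_mem.mp hcond.2
    rw [h] at this
    exact List.not_mem_nil this

theorem pv_walk_empty_ge (M : List (List (String × String))) (k : Nat)
    (h : pvWalkSet M (M.length + 1) = []) (hk : M.length + 1 ≤ k) :
    pvWalkSet M k = [] := by
  obtain ⟨j, rfl⟩ : ∃ j, k = (M.length + 1) + j := ⟨k - (M.length + 1), by omega⟩
  induction j with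
  | zero => exact h
  | succ j ihj => exact pv_walk_empty_succ M _ (ihj (by omega))

theorem pv_chain_bound (M : List (List (String × String)))
    (hW : pvWalkSet M (M.length + 1) = []) :
    ∀ (l : List String) (x : String) (k : Nat), x ∈ pvWalkSet M k →
      pvChain M x l → k + l.length ≤ M.length := by
  intro l
  induction l with
  | nil =>
    intro x k hx _
    simp only [List.length_nil, Nat.add_zero]
    by_contra hgt
    rw [pv_walk_empty_ge M k hW (by omega)] at hx
    exact List.not_mem_nil hx
  | cons b t ih =>
    intro x k hx hch
    rcases hch with ⟨hxb, hbt⟩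
    have := ih b (k + 1) (pv_children_next M x b k hx hxb) hbt
    simp only [List.length_cons]
    omega

theorem pv_bnd_mono (M : List (List (String × String))) (b b' : Nat) (x : String)
    (h : pvBnd M b x) (hb : b ≤ b') : pvBnd M b' x :=
  fun l hch => Nat.le_trans (h l hch) hb

theorem pv_bnd_child (M : List (List (String × String))) (b : Nat) (x c : String)
    (h : pvBnd M (b + 1) x) (hc : c ∈ pvChildren M x) : pvBnd M b c := by
  intro l hch
  have := h (c :: l) ⟨hc, hch⟩
  simpa using this

theorem pv_bnd_zero_children (M : List (List (String × String))) (x : String)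
    (h : pvBnd M 0 x) : pvChildren M x = [] := by
  rcases hne : pvChildren M x with _ | ⟨c, cs⟩
  · rfl
  · exfalso
    have hc : c ∈ pvChildren M x := by rw [hne]; exact List.mem_cons_self
    have := h [c] ⟨hc, trivial⟩
    simp at this

theorem pv_bnd_child' (M : List (List (String × String))) (n : Nat) (x c : String)
    (h : pvBnd M n x) (hc : c ∈ pvChildren M x) : pvBnd M n c := by
  cases n with
  | zero => rw [pv_bnd_zero_children M x h] at hc; exact absurd hc (List.not_mem_nil)
  | succ n' => exact pv_bnd_mono M n' (n' + 1) c (pv_bnd_child M n' x c h hc) (by omega)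

theorem pv_size_succ (g : PySem.Dict String (List String)) (f : Nat) (x : String) :
    pvCascadeSize g (f + 1) x = (g.getD x []).foldl (fun s c => s + pvCascadeSize g f c) 1 := rfl

theorem pv_size_stable (M : List (List (String × String)))
    (g : PySem.Dict String (List String)) (hg : ∀ y, g.getD y [] = pvChildren M y) :
    ∀ (b : Nat) (x : String), pvBnd M b x → ∀ f, b + 1 ≤ f →
      pvCascadeSize g f x = pvCascadeSize g (b + 1) x := by
  intro b
  induction b with
  | zero =>
    intro x hx f hf
    obtain ⟨f', rfl⟩ : ∃ f', f = f' + 1 := ⟨f - 1, by omega⟩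
    rw [pv_size_succ, pv_size_succ, hg, pv_bnd_zero_children M x hx]
    rfl
  | succ b ihb =>
    intro x hx f hf
    obtain ⟨f', rfl⟩ : ∃ f', f = f' + 1 := ⟨f - 1, by omega⟩
    rw [pv_size_succ g f', pv_size_succ g (b + 1), hg]
    apply PySem.List.foldl_congr_mem'
    intro c hc acc
    have hbc : pvBnd M b c := pv_bnd_child M b x c hx hc
    rw [ihb c hbc f' (by omega)]

theorem pv_size_pos (g : PySem.Dict String (List String)) :
    ∀ (f : Nat) (x : String), 1 ≤ pvCascadeSize g f x := by
  intro f
  induction f with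
  | zero => intro x; simp [pvCascadeSize]
  | succ f ihf =>
    intro x
    rw [pv_size_succ, PySem.List.foldl_add]
    refine le_add_of_nonneg_right (List.sum_nonneg ?_)
    intro y hy
    rcases List.mem_map.mp hy with ⟨c, _, rfl⟩
    exact le_trans zero_le_one (ihf c)

theorem pv_size_le (M : List (List (String × String)))
    (g : PySem.Dict String (List String)) (hg : ∀ y, g.getD y [] = pvChildren M y) :
    ∀ (f : Nat) (x : String),
      pvCascadeSize g f x ≤ ((M.length + 1 : Nat) : Int) ^ f := by
  intro f
  induction f with
  | zero => intro x; simp [pvCascadeSize]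
  | succ f ihf =>
    intro x
    rw [pv_size_succ, PySem.List.foldl_add]
    have hlen : (g.getD x []).length ≤ M.length := by
      rw [hg]
      calc (pvChildren M x).length
          = (M.filter _).length := List.length_map ..
        _ ≤ M.length := List.length_filter_le _ _
    have hsum : ((g.getD x []).map (fun c => pvCascadeSize g f c)).sum
        ≤ ((g.getD x []).length : Int) * ((M.length + 1 : Nat) : Int) ^ f := by
      have := List.sum_le_card_nsmul ((g.getD x []).map (fun c => pvCascadeSize g f c))
        (((M.length + 1 : Nat) : Int) ^ f) (by
          intro y hy
          rcases List.mem_map.mp hy with ⟨c, _, rfl⟩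
          exact ihf c)
      simpa [nsmul_eq_mul] using this
    have hpow : (1 : Int) ≤ ((M.length + 1 : Nat) : Int) ^ f :=
      one_le_pow₀ (by push_cast; omega)
    have hmul : ((g.getD x []).length : Int) * ((M.length + 1 : Nat) : Int) ^ f
        ≤ (M.length : Int) * ((M.length + 1 : Nat) : Int) ^ f := by
      apply mul_le_mul_of_nonneg_right _ (pow_nonneg (by push_cast; omega) f)
      exact_mod_cast hlen
    have hstep : ((M.length + 1 : Nat) : Int) ^ (f + 1)
        = ((M.length + 1 : Nat) : Int) ^ f + (M.length : Int) * ((M.length + 1 : Nat) : Int) ^ f := by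
      push_cast
      ring
    rw [hstep]
    simp only [show (fun c => pvCascadeSize g f c) = pvCascadeSize g f from rfl] at hsum
    omega

theorem pv_size_unfold (M : List (List (String × String)))
    (g : PySem.Dict String (List String)) (hg : ∀ y, g.getD y [] = pvChildren M y)
    (x : String) (hx : pvBnd M M.length x) :
    pvCascadeSize g (M.length + 1) x
      = 1 + ((pvChildren M x).map (fun c => pvCascadeSize g (M.length + 1) c)).sum := by
  cases hn : M.length with
  | zero =>
    rw [hn] at hx
    simp [pvCascadeSize, hg, pv_bnd_zero_children M x hx]
  | succ n' =>
    rw [pv_size_succ, PySem.List.foldl_add, hg]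
    congr 1
    refine congrArg List.sum (List.map_congr_left ?_)
    intro c hc
    have hbc : pvBnd M n' c := by
      rw [hn] at hx
      exact pv_bnd_child M n' x c hx hc
    exact (pv_size_stable M g hg n' c hbc (n' + 1 + 1) (by omega)).symm

theorem pv_sum_pos_nil (g : PySem.Dict String (List String)) (f : Nat)
    (stack : List String)
    (hle : (stack.map (fun y => pvCascadeSize g f y)).sum ≤ 0) : stack = [] := by
  cases stack with
  | nil => rfl
  | cons y ys =>
    exfalso
    have h1 : 1 ≤ pvCascadeSize g f y := pv_size_pos g f y
    have h2 : 0 ≤ (ys.map (fun y => pvCascadeSize g f y)).sum :=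
      List.sum_nonneg (by
        intro z hz
        rcases List.mem_map.mp hz with ⟨c, _, rfl⟩
        exact le_trans zero_le_one (pv_size_pos g f c))
    simp only [List.map_cons, List.sum_cons] at hle
    omega

theorem pv_dfs_sum (M : List (List (String × String)))
    (g : PySem.Dict String (List String)) (hg : ∀ y, g.getD y [] = pvChildren M y) :
    ∀ (fuel : Nat) (stack : List String) (acc : Int),
      (∀ y ∈ stack, pvBnd M M.length y) →
      (stack.map (fun y => pvCascadeSize g (M.length + 1) y)).sum ≤ (fuel : Int) →
      pvDfsLoop g fuel stack acc
        = acc + (stack.map (fun y => pvCascadeSize g (M.length + 1) y)).sum := by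
  intro fuel
  induction fuel with
  | zero =>
    intro stack acc hbnd hle
    rw [pv_sum_pos_nil g _ stack (by exact_mod_cast hle)]
    simp [pvDfsLoop]
  | succ f ihf =>
    intro stack acc hbnd hle
    rcases hst : stack with _ | ⟨s, ss⟩
    · simp [pvDfsLoop]
    subst hst
    obtain ⟨rest, x, hsplit⟩ : ∃ rest x, s :: ss = rest ++ [x] :=
      ⟨(s :: ss).dropLast, (s :: ss).getLast (by simp),
        (List.dropLast_append_getLast (by simp)).symm⟩
    have hxmem : x ∈ s :: ss := by rw [hsplit]; simp
    have hxbnd : pvBnd M M.length x := hbnd x hxmem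
    have hdrop : (s :: ss).dropLast = rest := by rw [hsplit, List.dropLast_concat]
    have hlastD : (s :: ss).getLastD "" = x := by
      rw [hsplit, List.getLastD_concat]
    have hsum0 : ((s :: ss).map (fun y => pvCascadeSize g (M.length + 1) y)).sum
        = (rest.map (fun y => pvCascadeSize g (M.length + 1) y)).sum
          + pvCascadeSize g (M.length + 1) x := by
      rw [hsplit]
      simp
    have hxun := pv_size_unfold M g hg x hxbnd
    have hnewsum : ((rest ++ pvChildren M x).map
          (fun y => pvCascadeSize g (M.length + 1) y)).sum
        = ((s :: ss).map (fun y => pvCascadeSize g (M.length + 1) y)).sum - 1 := by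
      rw [hsum0, hxun, List.map_append, List.sum_append]
      omega
    simp only [pvDfsLoop, hlastD, hg, hdrop]
    rw [ihf (rest ++ pvChildren M x) (acc + 1) ?hb ?hf, hnewsum]
    · omega
    case hb =>
      intro y hy
      rcases List.mem_append.mp hy with hy1 | hy2
      · exact hbnd y (by rw [hsplit]; exact List.mem_append.mpr (Or.inl hy1))
      · exact pv_bnd_child' M M.length x y hxbnd hy2
    case hf =>
      rw [hnewsum]
      have hpos : 1 ≤ pvCascadeSize g (M.length + 1) x := pv_size_pos g _ x
      push_cast at hle ⊢
      omega

theorem pv_final : ∀ (messages : List (List (String × String))),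
    Pre_detect_message_cascades_py messages →
    detect_message_cascades_py messages = detect_message_cascades_py_alt messages := by
  intro M hpre
  rcases hpre with ⟨_, hW⟩
  have hg : ∀ y, (pvBuild M).1.getD y [] = pvChildren M y := by
    intro y
    have h1 := pv_build_graph_getD M PySem.Dict.empty [] y
    simpa [pvBuild] using h1
  have hroots : (pvBuild M).2 = pvWalkSet M 0 := by
    have h2 := pv_build_roots M PySem.Dict.empty []
    simpa [pvBuild, pvWalkSet] using h2
  have hrootbnd : ∀ r ∈ (pvBuild M).2, pvBnd M M.length r := by
    intro r hr l hch
    have hr0 : r ∈ pvWalkSet M 0 := hroots ▸ hr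
    have := pv_chain_bound M hW l r 0 hr0 hch
    omega
  simp only [detect_message_cascades_py, detect_message_cascades_py_alt]
  apply PySem.List.foldl_congr_mem'
  intro r hr acc
  have hb := hrootbnd r hr
  have hdfs := pv_dfs_sum M (pvBuild M).1 hg ((M.length + 1) ^ (M.length + 1)) [r] 0
    (by intro y hy; simp only [List.mem_singleton] at hy; subst hy; exact hb)
    (by
      simp only [List.map_cons, List.map_nil, List.sum_cons, List.sum_nil, Int.add_zero]
      calc pvCascadeSize (pvBuild M).1 (M.length + 1) r
          ≤ ((M.length + 1 : Nat) : Int) ^ (M.length + 1) := pv_size_le M _ hg _ r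
        _ = (((M.length + 1) ^ (M.length + 1) : Nat) : Int) := by push_cast; ring)
  rw [hdfs]
  simp

-- ===== VERDICT (by name: the statement is the Claim_ definition above) =====
theorem detect_message_cascades_py_spec : Claim_equal_detect_message_cascades_py := by
  intro messages _ hpre
  unfold Spec_detect_message_cascades_py
  exact pv_final messages hpre
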